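-- pv_equiv track=rewrite | github.com/nsna/aoc | 2024/day_09.py | all_free_segments
-- ===== SOURCE A (Python) =====
-- from collections import defaultdict
--
-- def all_free_segments(fs):
--     free_blocks = defaultdict(int)
--     seq = None
--     for key, value in fs.items():
--         if value is None:
--             if seq is None:
--                 seq = key
--             free_blocks[seq] += 1
--         else:
--             seq = None
--     return free_blocks
-- ===== SOURCE B (Python) =====
-- from collections import defaultdict
--
-- def all_free_segments(fs):
--     # boundary detection: find run starts and run ends as index filters, then pair them
--     items = list(fs.items())
--     is_free = [v is None for _, v in items]
--     n = len(items)
--     free_blocks = defaultdict(int)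
--     starts = [i for i in range(n) if is_free[i] and (i == 0 or not is_free[i - 1])]
--     ends = [i for i in range(n) if is_free[i] and (i == n - 1 or not is_free[i + 1])]
--     for s, e in zip(starts, ends):
--         free_blocks[items[s][0]] += e - s + 1
--     return free_blocks
-- ===== Notes on version B (the rewrite author's own statement) =====
-- stated objective: alternative
-- what changed: Replaces A's per-item state machine (a seq variable carried through one scan) with boundary detection: two index filters compute the run starts (free with non-free predecessor) and run ends (free with non-free successor) independently, which are then zipped and paired to give each segment's start key and length.
import Mathlib
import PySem

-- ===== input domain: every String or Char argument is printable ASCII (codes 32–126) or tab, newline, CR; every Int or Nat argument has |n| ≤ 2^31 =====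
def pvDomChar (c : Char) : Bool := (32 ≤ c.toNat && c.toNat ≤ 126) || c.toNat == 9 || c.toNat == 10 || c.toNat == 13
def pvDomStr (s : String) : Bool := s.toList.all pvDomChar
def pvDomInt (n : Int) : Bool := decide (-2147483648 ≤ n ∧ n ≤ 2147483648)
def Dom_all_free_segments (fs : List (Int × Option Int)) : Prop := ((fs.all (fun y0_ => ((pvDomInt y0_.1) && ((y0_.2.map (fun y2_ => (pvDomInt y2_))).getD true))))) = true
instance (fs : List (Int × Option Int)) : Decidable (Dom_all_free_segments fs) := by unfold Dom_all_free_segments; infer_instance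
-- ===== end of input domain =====

-- B replaces A's per-item state machine by boundary detection: run starts and run ends are
-- computed as two independent index filters over range(n) and zipped into segments.

-- ===== PORT A =====
-- one iteration of A's for-loop: state = (free_blocks, seq)
def aStep (st : PySem.Dict Int Int × Option Int) (kv : Int × Option Int) :
    PySem.Dict Int Int × Option Int :=
  match kv.2 with
  | none =>
      -- if seq is None: seq = key; free_blocks[seq] += 1  (defaultdict(int))
      let s := st.2.getD kv.1
      (st.1.insert s (st.1.getD s 0 + 1), some s)
  | some _ => (st.1, none)

def all_free_segments (fs : List (Int × Option Int)) : List (Int × Int) :=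
  ((fs.foldl aStep (PySem.Dict.empty, none)).1).items

-- ===== PORT B =====
-- transliteration of Source B: the is_free bool list, the two index filters over range(n),
-- the zip, and the fold performing free_blocks[items[s][0]] += e - s + 1
def all_free_segments_alt (fs : List (Int × Option Int)) : List (Int × Int) :=
  let items := fs
  let is_free := items.map (fun p => p.2.isNone)
  let n := items.length
  let starts := (List.range n).filter
    (fun i => is_free.getD i false && (decide (i = 0) || !(is_free.getD (i - 1) false)))
  let ends := (List.range n).filter
    (fun i => is_free.getD i false && (decide (i = n - 1) || !(is_free.getD (i + 1) false)))
  (((starts.zip ends).foldl (fun d se =>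
      let k := (items.getD se.1 (0, none)).1
      d.insert k (d.getD k 0 + (((se.2 : Int) - (se.1 : Int)) + 1)))
    (PySem.Dict.empty : PySem.Dict Int Int))).items

-- ===== PRECONDITION & SPEC =====
def Spec_all_free_segments (fs : List (Int × Option Int)) (out : List (Int × Int)) : Prop := out = all_free_segments_alt fs
instance (fs : List (Int × Option Int)) (out : List (Int × Int)) : Decidable (Spec_all_free_segments fs out) := by unfold Spec_all_free_segments; infer_instance

-- ===== CLAIM (what is proved, stated in full; the proofs are below) =====
def Claim_equal_all_free_segments : Prop := ∀ (fs : List (Int × Option Int)), Dom_all_free_segments fs → Spec_all_free_segments fs (all_free_segments fs)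

-- ===== LEMMAS AND PROOFS =====

-- proof-only common decomposition: (start key, run length) per maximal free run
def segs : List (Int × Option Int) → List (Int × Int)
  | [] => []
  | (_, some _) :: rest => segs rest
  | (k, none) :: rest =>
      (k, 1 + ((rest.takeWhile (fun p => p.2.isNone)).length : Int))
        :: segs (rest.dropWhile (fun p => p.2.isNone))
termination_by fs => fs.length
decreasing_by
  · simp
  · have := List.length_dropWhile_le (fun p : Int × Option Int => p.2.isNone) rest
    simp; omega

def stepSeg (d : PySem.Dict Int Int) (kc : Int × Int) : PySem.Dict Int Int :=
  d.insert kc.1 (d.getD kc.1 0 + kc.2)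

-- the two recursive characterizations of B's index filters
def startsB (prev : Bool) : List Bool → List Nat
  | [] => []
  | b :: bs => (if b && !prev then [0] else []) ++ (startsB b bs).map (· + 1)

def endsB : List Bool → List Nat
  | [] => []
  | b :: bs => (if b && !(bs.getD 0 false) then [0] else []) ++ (endsB bs).map (· + 1)

def outerF (fs : List (Int × Option Int)) (se : Nat × Nat) : Int × Int :=
  ((fs.getD se.1 (0, none)).1, (((se.2 : Int) - (se.1 : Int)) + 1))

-- folding A's step over a run of all-None items just keeps adding 1 at key s
theorem run_foldl (run : List (Int × Option Int)) (h : ∀ p ∈ run, p.2 = none) :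
    ∀ (d : PySem.Dict Int Int) (s c : Int) (tail : List (Int × Option Int)),
    (run ++ tail).foldl aStep (d.insert s c, some s)
      = tail.foldl aStep (d.insert s (c + (run.length : Int)), some s) := by
  induction run with
  | nil => intro d s c tail; simp
  | cons p run ih =>
    intro d s c tail
    have hp : p.2 = none := h p (by simp)
    have hrest : ∀ q ∈ run, q.2 = none := fun q hq => h q (by simp [hq])
    have step : aStep (d.insert s c, some s) p = ((d.insert s c).insert s (c + 1), some s) := by
      simp [aStep, hp, PySem.Dict.getD_insert_self]
    rw [List.cons_append, List.foldl_cons, step, PySem.Dict.insert_insert_self,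
        ih hrest d s (c + 1) tail]
    have : c + 1 + (run.length : Int) = c + ((p :: run).length : Int) := by
      simp only [List.length_cons, Nat.cast_add, Nat.cast_one]; ring
    rw [this]

-- the head of dropWhile fails the predicate
theorem dropWhile_head_false {α : Type} (p : α → Bool) (l : List α) :
    ∀ q t, l.dropWhile p = q :: t → p q = false := by
  induction l with
  | nil => intro q t h; simp [List.dropWhile] at h
  | cons x xs ih =>
    intro q t h
    by_cases hx : p x = true
    · rw [List.dropWhile_cons_of_pos hx] at h; exact ih q t h
    · rw [List.dropWhile_cons_of_neg hx] at h
      cases h; simpa using hx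

-- A's foldl equals the fold of stepSeg over the segment decomposition
theorem a_eq_segs : ∀ (fs : List (Int × Option Int)) (d : PySem.Dict Int Int),
    (fs.foldl aStep (d, none)).1 = (segs fs).foldl stepSeg d := by
  intro fs
  induction fs using segs.induct with
  | case1 => intro d; simp [segs]
  | case2 k v rest ih =>
    intro d
    rw [List.foldl_cons]
    have : aStep (d, none) (k, some v) = (d, none) := by simp [aStep]
    rw [this, segs]
    exact ih d
  | case3 k rest ih =>
    intro d
    rw [segs, List.foldl_cons]
    set run := rest.takeWhile (fun p : Int × Option Int => p.2.isNone) with hrun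
    set rest' := rest.dropWhile (fun p : Int × Option Int => p.2.isNone) with hrest'
    have hsplit : rest = run ++ rest' := by
      rw [hrun, hrest']; exact (List.takeWhile_append_dropWhile).symm
    have hall : ∀ p ∈ run, p.2 = none := by
      intro p hp
      have := List.mem_takeWhile_imp (hrun ▸ hp)
      simpa [Option.isNone_iff_eq_none] using this
    have stepA : aStep (d, none) (k, none) = (d.insert k (d.getD k 0 + 1), some k) := by
      simp [aStep]
    rw [stepA]
    conv_lhs => rw [hsplit]
    rw [run_foldl run hall d k (d.getD k 0 + 1) rest']
    have harith : d.getD k 0 + 1 + (run.length : Int) = d.getD k 0 + (1 + (run.length : Int)) := by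
      ring
    rw [harith]
    have hstep : stepSeg d (k, 1 + (run.length : Int))
        = d.insert k (d.getD k 0 + (1 + (run.length : Int))) := rfl
    rw [List.foldl_cons, hstep]
    -- seq = some k vs seq = none on rest', whose head (if any) is not None
    have hsame : (rest'.foldl aStep (d.insert k (d.getD k 0 + (1 + (run.length : Int))), some k)).1
        = (rest'.foldl aStep (d.insert k (d.getD k 0 + (1 + (run.length : Int))), none)).1 := by
      cases hr : rest' with
      | nil => rfl
      | cons q t =>
        have hq : (fun p : Int × Option Int => p.2.isNone) q = false :=
          dropWhile_head_false _ rest q t (hrest'.symm.trans hr)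
        obtain ⟨qk, qv⟩ := q
        cases hqv : qv with
        | none => simp [hqv] at hq
        | some w =>
          subst hqv
          simp only [List.foldl_cons]
          have e1 : aStep (d.insert k (d.getD k 0 + (1 + (run.length : Int))), some k) (qk, some w)
              = (d.insert k (d.getD k 0 + (1 + (run.length : Int))), none) := by simp [aStep]
          have e2 : aStep (d.insert k (d.getD k 0 + (1 + (run.length : Int))), none) (qk, some w)
              = (d.insert k (d.getD k 0 + (1 + (run.length : Int))), none) := by simp [aStep]
          rw [e1, e2]
    rw [hsame]
    exact ih _

-- the starts index filter is startsB
theorem starts_filter (l : List Bool) : ∀ (prev : Bool),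
    (List.range l.length).filter
      (fun i => l.getD i false && (if i = 0 then !prev else !(l.getD (i - 1) false)))
      = startsB prev l := by
  induction l with
  | nil => intro prev; simp [startsB]
  | cons b bs ih =>
    intro prev
    rw [List.length_cons, List.range_succ_eq_map, List.filter_cons, List.filter_map]
    have htail : ((fun i => (b :: bs).getD i false &&
        (if i = 0 then !prev else !((b :: bs).getD (i - 1) false))) ∘ Nat.succ)
        = (fun i => bs.getD i false && (if i = 0 then !b else !(bs.getD (i - 1) false))) := by
      funext i
      cases i with
      | zero => simp
      | succ j => simp
    rw [htail, ih b, startsB]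
    cases b <;> cases prev <;> simp

-- the ends index filter is endsB
theorem ends_filter (l : List Bool) :
    (List.range l.length).filter (fun i => l.getD i false && !(l.getD (i + 1) false))
      = endsB l := by
  induction l with
  | nil => simp [endsB]
  | cons b bs ih =>
    rw [List.length_cons, List.range_succ_eq_map, List.filter_cons, List.filter_map]
    have htail : ((fun i => (b :: bs).getD i false && !((b :: bs).getD (i + 1) false)) ∘ Nat.succ)
        = (fun i => bs.getD i false && !(bs.getD (i + 1) false)) := by
      funext i; simp
    rw [htail, ih, endsB]
    cases b <;> cases hb : (bs.getD 0 false) <;> simp only [List.getD] at hb <;>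
      simp [hb]

-- when the first element is not free, the carried prev does not matter
theorem startsB_prev (b : Bool) (l : List Bool) (h : l.getD 0 false = false) :
    startsB b l = startsB false l := by
  cases l with
  | nil => rfl
  | cons x xs =>
    have hx : x = false := by simpa using h
    subst hx
    simp [startsB]

-- startsB over a run of trues (with prev = true) just shifts
theorem startsB_replicate (Y : List Bool) : ∀ (m : Nat),
    startsB true (List.replicate m true ++ Y) = (startsB true Y).map (· + m) := by
  intro m
  induction m with
  | zero => simp
  | succ m ih =>
    rw [List.replicate_succ, List.cons_append, startsB, ih]
    simp only [Bool.and_not_self, Bool.false_eq_true, if_false, List.nil_append, List.map_map]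
    congr 1

-- endsB over a nonempty run of trues followed by a non-free (or empty) tail
theorem endsB_replicate (Y : List Bool) (h : Y.getD 0 false = false) : ∀ (m : Nat),
    endsB (List.replicate (m + 1) true ++ Y) = m :: (endsB Y).map (· + (m + 1)) := by
  intro m
  induction m with
  | zero =>
    have h' : Y[0]?.getD false = false := by simpa [List.getD] using h
    simp [endsB, h']
  | succ m ih =>
    rw [List.replicate_succ, List.cons_append, endsB, ih]
    have hget : ((List.replicate (m + 1) true ++ Y).getD 0 false) = true := by
      rw [List.replicate_succ]; simp
    rw [hget]
    simp only [Bool.not_true, Bool.and_false, Bool.false_eq_true, if_false, List.nil_append,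
      List.map_cons, List.map_map]
    refine List.cons_eq_cons.mpr ⟨rfl, ?_⟩
    congr 1

-- B's zipped boundary pairs, mapped to (start key, length), give the segment decomposition
theorem b_eq_segs : ∀ (fs : List (Int × Option Int)),
    ((startsB false (fs.map (fun p => p.2.isNone))).zip
      (endsB (fs.map (fun p => p.2.isNone)))).map (outerF fs) = segs fs := by
  intro fs
  induction fs using segs.induct with
  | case1 => simp [startsB, endsB, segs]
  | case2 k v rest ih =>
    rw [segs, ← ih]
    simp only [List.map_cons, Option.isNone_some]
    rw [startsB, endsB]
    simp only [Bool.false_and, Bool.false_eq_true, if_false, List.nil_append]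
    rw [List.zip_map, List.map_map]
    apply List.map_congr_left
    intro se _
    obtain ⟨s, e⟩ := se
    simp only [Function.comp_apply, Prod.map_apply, outerF, List.getD_cons_succ, Prod.mk.injEq]
    refine ⟨trivial, by push_cast; ring⟩
  | case3 k rest ih =>
    rw [segs]
    set run := rest.takeWhile (fun p : Int × Option Int => p.2.isNone) with hrun
    set rest' := rest.dropWhile (fun p : Int × Option Int => p.2.isNone) with hrest'
    have hsplit : rest = run ++ rest' := by
      rw [hrun, hrest']; exact (List.takeWhile_append_dropWhile).symm
    set r := run.length with hr
    have hrep : run.map (fun p : Int × Option Int => p.2.isNone) = List.replicate r true := by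
      rw [List.eq_replicate_iff]
      refine ⟨by simp [hr], ?_⟩
      intro b hb
      obtain ⟨p, hp, hpb⟩ := List.mem_map.mp hb
      have := List.mem_takeWhile_imp (hrun ▸ hp)
      rw [← hpb]; exact this
    set Y := rest'.map (fun p : Int × Option Int => p.2.isNone) with hY
    have hY0 : Y.getD 0 false = false := by
      cases hc : rest' with
      | nil => simp [hY, hc]
      | cons q t =>
        have hq := dropWhile_head_false (fun p : Int × Option Int => p.2.isNone) rest q t
          (hrest'.symm.trans hc)
        simp [hY, hc, hq]
    have hmap : ((k, (none : Option Int)) :: rest).map (fun p => p.2.isNone)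
        = List.replicate (r + 1) true ++ Y := by
      rw [List.replicate_succ, List.cons_append]
      simp only [List.map_cons, Option.isNone_none]
      congr 1
      rw [hsplit, List.map_append, hrep, hY]
    rw [hmap]
    have hs : startsB false (List.replicate (r + 1) true ++ Y)
        = 0 :: ((startsB false Y).map (· + (r + 1))) := by
      rw [List.replicate_succ, List.cons_append, startsB]
      rw [startsB_replicate, startsB_prev true Y hY0]
      simp only [Bool.not_false, Bool.and_true, if_true, List.cons_append, List.nil_append,
        List.map_map]
      congr 1
    rw [hs, endsB_replicate Y hY0 r, List.zip_cons_cons, List.map_cons]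
    have hhead : outerF ((k, (none : Option Int)) :: rest) (0, r)
        = (k, 1 + (r : Int)) := by
      simp only [outerF, List.getD_cons_zero, Prod.mk.injEq]
      refine ⟨trivial, by push_cast; ring⟩
    rw [hhead, hr, hrun]
    congr 1
    rw [List.zip_map, List.map_map, ← ih]
    apply List.map_congr_left
    intro se _
    obtain ⟨s, e⟩ := se
    simp only [Function.comp_apply, Prod.map_apply, outerF, Prod.mk.injEq]
    have hkey : (((k, (none : Option Int)) :: rest).getD (s + (r + 1)) (0, none))
        = rest'.getD s (0, none) := by
      have h1 : s + (r + 1) = (s + r) + 1 := by omega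
      rw [h1, List.getD_cons_succ, hsplit, List.getD_append_right run rest' (0, none) (s + r)
        (by omega)]
      congr 1
      omega
    constructor
    · rw [hkey]
    · push_cast; ring

-- ===== VERDICT (by name: the statement is the Claim_ definition above) =====
theorem all_free_segments_spec : Claim_equal_all_free_segments := by
  intro fs _
  unfold Spec_all_free_segments all_free_segments all_free_segments_alt
  rw [a_eq_segs]
  congr 1
  -- identify the port's filters with startsB / endsB
  set l := fs.map (fun p : Int × Option Int => p.2.isNone) with hl
  have hlen : fs.length = l.length := by simp [hl]
  have hstarts : (List.range fs.length).filter
      (fun i => l.getD i false && (decide (i = 0) || !(l.getD (i - 1) false)))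
      = startsB false l := by
    rw [hlen, ← starts_filter l false]
    apply List.filter_congr
    intro i _
    by_cases hi : i = 0
    · subst hi; simp
    · simp [hi]
  have hends : (List.range fs.length).filter
      (fun i => l.getD i false && (decide (i = fs.length - 1) || !(l.getD (i + 1) false)))
      = endsB l := by
    rw [hlen, ← ends_filter l]
    apply List.filter_congr
    intro i hi
    have hilt : i < l.length := List.mem_range.mp hi
    by_cases hie : i = l.length - 1
    · have h2 : l.length ≤ i + 1 := by omega
      rw [List.getD_eq_default l false h2]
      simp [hie]
    · simp [hie]
  rw [hstarts, hends]
  have := b_eq_segs fs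
  rw [← this, List.foldl_map]
  rfl
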